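-- pv_equiv track=rewrite | github.com/0asa0/python-sql-query | sql.py | checkdelete
-- ===== SOURCE A (Python) =====
-- def checkdelete(query):
--     input_list = query.lower().split()
--
--     if len(input_list) < 7:
--         return False
--     if input_list[0] != "delete":
--         return False
--
--     if input_list[1] != "from":
--         return False
--
--     if input_list[2] != "students":
--         return False
--
--     index = 3
--     while index < len(input_list):
--         if input_list[index] == "where":
--             index += 1
--             if index >= len(input_list):
--                 return False
--
--             if input_list[index] not in ["id", "name", "lastname", "email", "grade"]:
--                 return False
--
--             index += 1
--             if index >= len(input_list):
--                 return False
--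
--             if input_list[index - 1] in ["name", "lastname", "email"]:
--                 if input_list[index] not in ['=', '!=']:
--                     return False
--
--             if input_list[index] not in ['=', '!=', '<', '>', '<=', '>=', '!<', '!>']:
--                 return False
--
--             index += 1
--             if index >= len(input_list):
--                 return False
--
--             if input_list[index].isdigit():
--                 pass  # Sayı geçerli, devam et
--
--             elif input_list[index].startswith("'") and input_list[index].endswith("'"):
--                 # String geçerli, ancak sadece = veya != kullanılabilir
--                 if input_list[index - 1] not in ['=', '!=']:
--                     return False
--             else:
--                 return False  # Geçerli sayı veya string değil
--
--         elif input_list[index] == "and" or input_list[index] == "or":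
--             index += 1
--             if index >= len(input_list):
--                 return False
--
--             if input_list[index] not in ["id", "name", "lastname", "email", "grade"]:
--                 return False
--
--             index += 1
--             if index >= len(input_list):
--                 return False
--
--             if input_list[index - 1] in ["name", "lastname", "email"]:
--                 if input_list[index] not in ['=', '!=']:
--                     return False
--
--             if input_list[index] not in ['=', '!=', '<', '>', '<=', '>=', '!<', '!>']:
--                 return False
--
--             index += 1
--             if index >= len(input_list):
--                 return False
--
--             if input_list[index].isdigit():
--                 pass  # Sayı geçerli, devam et
--
--             elif input_list[index].startswith("'") and input_list[index].endswith("'"):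
--
--                 # String geçerli, ancak sadece = veya != kullanılabilir
--                 if input_list[index - 1] not in ['=', '!=']:
--                     return False
--             else:
--                 return False  # Geçerli sayı veya string değil
--
--         else:
--             return False
--         index += 1
--     return True
-- ===== SOURCE B (Python) =====
-- COLS = {"id", "name", "lastname", "email", "grade"}
-- STRICT = {"name", "lastname", "email"}
-- OPS = {'=', '!=', '<', '>', '<=', '>=', '!<', '!>'}
-- EQ = {'=', '!='}
--
-- def checkdelete(query):
--     t = query.lower().split()
--     if len(t) < 7 or t[:3] != ["delete", "from", "students"] or (len(t) - 3) % 4: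
--         return False
--     # transpose the clause region into four parallel streams and validate each
--     # stream in its own staged pass (cross-stream rules via zip)
--     kws, cols, ops, vals = t[3::4], t[4::4], t[5::4], t[6::4]
--     if not all(k in ("where", "and", "or") for k in kws):
--         return False
--     if not all(c in COLS for c in cols):
--         return False
--     if not all(o in OPS and (c not in STRICT or o in EQ) for c, o in zip(cols, ops)):
--         return False
--     return all(v.isdigit() or (v.startswith("'") and v.endswith("'") and o in EQ)
--                for o, v in zip(ops, vals))
-- ===== Notes on version B (the rewrite author's own statement) =====
-- stated objective: alternative
-- what changed: Replaced A's index-advancing while-loop state machine (with duplicated where/and-or branch bodies) by a header + length-divisibility precheck, a slice-transpose of the clause region into four parallel streams (keywords, columns, operators, values), and staged column-wise validation passes with zip for the cross-stream rules.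
import Mathlib
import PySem

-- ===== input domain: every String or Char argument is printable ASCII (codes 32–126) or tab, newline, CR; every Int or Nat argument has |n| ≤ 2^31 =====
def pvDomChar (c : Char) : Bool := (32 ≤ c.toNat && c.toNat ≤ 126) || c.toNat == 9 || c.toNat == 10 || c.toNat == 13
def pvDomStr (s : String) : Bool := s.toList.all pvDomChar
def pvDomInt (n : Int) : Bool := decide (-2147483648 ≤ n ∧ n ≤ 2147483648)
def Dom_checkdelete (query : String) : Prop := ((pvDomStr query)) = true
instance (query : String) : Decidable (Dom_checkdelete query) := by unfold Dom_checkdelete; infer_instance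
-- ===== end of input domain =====

-- B replaces A's index-advancing while-loop state machine (with duplicated where/and-or branch
-- bodies) by a header + length%4 precheck, a step-4 slice transpose of the clause region into four
-- parallel streams, and staged column-wise validation passes (zip for cross-stream rules).


-- ===== PORT A =====
-- A's while loop, one call per iteration; `index` is the position of the clause keyword.
def pvLoopA (ts : List String) (index : Nat) : Bool :=
  if index < ts.length then
    if ts.getD index "" = "where" then
      if ¬ (index + 1 < ts.length) then false
      else if ts.getD (index+1) "" ∉ ["id", "name", "lastname", "email", "grade"] then false
      else if ¬ (index + 2 < ts.length) then false
      else if ts.getD (index+1) "" ∈ ["name", "lastname", "email"] ∧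
              ts.getD (index+2) "" ∉ ["=", "!="] then false
      else if ts.getD (index+2) "" ∉ ["=", "!=", "<", ">", "<=", ">=", "!<", "!>"] then false
      else if ¬ (index + 3 < ts.length) then false
      else if PySem.Str.strIsdigit (ts.getD (index+3) "") then pvLoopA ts (index+4)
      else if PySem.Str.startswith (ts.getD (index+3) "") "'" &&
              PySem.Str.endswith (ts.getD (index+3) "") "'" then
        if ts.getD (index+2) "" ∉ ["=", "!="] then false else pvLoopA ts (index+4)
      else false
    else if ts.getD index "" = "and" ∨ ts.getD index "" = "or" then
      if ¬ (index + 1 < ts.length) then false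
      else if ts.getD (index+1) "" ∉ ["id", "name", "lastname", "email", "grade"] then false
      else if ¬ (index + 2 < ts.length) then false
      else if ts.getD (index+1) "" ∈ ["name", "lastname", "email"] ∧
              ts.getD (index+2) "" ∉ ["=", "!="] then false
      else if ts.getD (index+2) "" ∉ ["=", "!=", "<", ">", "<=", ">=", "!<", "!>"] then false
      else if ¬ (index + 3 < ts.length) then false
      else if PySem.Str.strIsdigit (ts.getD (index+3) "") then pvLoopA ts (index+4)
      else if PySem.Str.startswith (ts.getD (index+3) "") "'" &&
              PySem.Str.endswith (ts.getD (index+3) "") "'" then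
        if ts.getD (index+2) "" ∉ ["=", "!="] then false else pvLoopA ts (index+4)
      else false
    else false
  else true
termination_by ts.length - index

def checkdelete (query : String) : Bool :=
  let input_list := PySem.Str.split₀ (PySem.Str.lower query)
  if input_list.length < 7 then false
  else if input_list.getD 0 "" ≠ "delete" then false
  else if input_list.getD 1 "" ≠ "from" then false
  else if input_list.getD 2 "" ≠ "students" then false
  else pvLoopA input_list 3

-- ===== PORT B =====
def pvCOLS : List String := ["id", "name", "lastname", "email", "grade"]
def pvSTRICT : List String := ["name", "lastname", "email"]
def pvOPS : List String := ["=", "!=", "<", ">", "<=", ">=", "!<", "!>"]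
def pvEQ : List String := ["=", "!="]

-- xs[0::4]: every fourth element starting at the head (exact for step 4, nonnegative start)
def pvEvery4 : List String → List String
  | [] => []
  | a :: rest => a :: pvEvery4 (rest.drop 3)
termination_by l => l.length
decreasing_by simp

def checkdelete_alt (query : String) : Bool :=
  let t := PySem.Str.split₀ (PySem.Str.lower query)
  if t.length < 7 ∨ t.take 3 ≠ ["delete", "from", "students"] ∨ (t.length - 3) % 4 ≠ 0 then false
  else
    -- t[3::4], t[4::4], t[5::4], t[6::4]
    let kws := pvEvery4 (t.drop 3)
    let cols := pvEvery4 (t.drop 4)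
    let ops := pvEvery4 (t.drop 5)
    let vals := pvEvery4 (t.drop 6)
    if ¬ (kws.all fun k => decide (k ∈ ["where", "and", "or"])) then false
    else if ¬ (cols.all fun c => decide (c ∈ pvCOLS)) then false
    else if ¬ ((cols.zip ops).all fun p =>
        decide (p.2 ∈ pvOPS) && (decide (p.1 ∉ pvSTRICT) || decide (p.2 ∈ pvEQ))) then false
    else (ops.zip vals).all fun p =>
        PySem.Str.strIsdigit p.2 ||
        (PySem.Str.startswith p.2 "'" && PySem.Str.endswith p.2 "'" && decide (p.1 ∈ pvEQ))

-- ===== PRECONDITION & SPEC =====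
def Spec_checkdelete (query : String) (out : Bool) : Prop := out = checkdelete_alt query
instance (query : String) (out : Bool) : Decidable (Spec_checkdelete query out) := by unfold Spec_checkdelete; infer_instance

-- ===== CLAIM (what is proved, stated in full; the proofs are below) =====
def Claim_equal_checkdelete : Prop := ∀ (query : String), Dom_checkdelete query → Spec_checkdelete query (checkdelete query)

-- ===== LEMMAS AND PROOFS =====

-- B's body after the prechecks, as a function of the clause region
def pvStaged (rest : List String) : Bool :=
  if ¬ ((pvEvery4 rest).all fun k => decide (k ∈ ["where", "and", "or"])) then false
  else if ¬ ((pvEvery4 (rest.drop 1)).all fun c => decide (c ∈ pvCOLS)) then false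
  else if ¬ (((pvEvery4 (rest.drop 1)).zip (pvEvery4 (rest.drop 2))).all fun p =>
      decide (p.2 ∈ pvOPS) && (decide (p.1 ∉ pvSTRICT) || decide (p.2 ∈ pvEQ))) then false
  else ((pvEvery4 (rest.drop 2)).zip (pvEvery4 (rest.drop 3))).all fun p =>
      PySem.Str.strIsdigit p.2 ||
      (PySem.Str.startswith p.2 "'" && PySem.Str.endswith p.2 "'" && decide (p.1 ∈ pvEQ))

-- the per-clause conjunction the staged passes amount to
def pvClauseB (kw col op val : String) : Bool :=
  decide (kw ∈ ["where", "and", "or"]) && decide (col ∈ pvCOLS) &&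
  (decide (op ∈ pvOPS) && (decide (col ∉ pvSTRICT) || decide (op ∈ pvEQ))) &&
  (PySem.Str.strIsdigit val ||
   (PySem.Str.startswith val "'" && PySem.Str.endswith val "'" && decide (op ∈ pvEQ)))

-- row-wise recursion used only as the bridge between A's loop and B's staged passes
def pvRows : List String → Bool
  | [] => true
  | kw :: col :: op :: val :: rest => pvClauseB kw col op val && pvRows rest
  | [_] => false
  | [_, _] => false
  | [_, _, _] => false

lemma pvRows_mod (l : List String) (h : pvRows l = true) : l.length % 4 = 0 := by
  induction l using pvRows.induct with
  | case1 => simp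
  | case2 kw col op val rest ih =>
      simp only [pvRows, Bool.and_eq_true] at h
      have := ih h.2
      simp only [List.length_cons]; omega
  | case3 => simp [pvRows] at h
  | case4 => simp [pvRows] at h
  | case5 => simp [pvRows] at h

lemma pvEvery4_nil : pvEvery4 [] = [] := by
  rw [pvEvery4]

lemma pvEvery4_cons (a : String) (rest : List String) :
    pvEvery4 (a :: rest) = a :: pvEvery4 (rest.drop 3) := by
  rw [pvEvery4]

lemma pvStaged_cons (k c o v : String) (l : List String) :
    pvStaged (k :: c :: o :: v :: l) = (pvClauseB k c o v && pvStaged l) := by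
  unfold pvStaged pvClauseB
  simp only [List.drop_succ_cons, List.drop_zero, pvEvery4_cons, List.drop_succ_cons,
    List.drop_zero, List.zip_cons_cons, List.all_cons]
  cases h1 : decide (k ∈ ["where", "and", "or"]) <;>
    cases h2 : decide (c ∈ pvCOLS) <;>
      cases h3 : (decide (o ∈ pvOPS) && (decide (c ∉ pvSTRICT) || decide (o ∈ pvEQ))) <;>
        cases h4 : (PySem.Str.strIsdigit v ||
          (PySem.Str.startswith v "'" && PySem.Str.endswith v "'" && decide (o ∈ pvEQ))) <;>
          simp_all

lemma pvRows_eq_staged (l : List String) (h : l.length % 4 = 0) : pvRows l = pvStaged l := by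
  induction l using pvRows.induct with
  | case1 => simp [pvRows, pvStaged, pvEvery4_nil]
  | case2 kw col op val rest ih =>
      have hm : rest.length % 4 = 0 := by
        simp only [List.length_cons] at h; omega
      rw [pvRows, pvStaged_cons, ih hm]
  | case3 a => simp only [List.length_cons, List.length_nil] at h; omega
  | case4 => simp only [List.length_cons, List.length_nil] at h; omega
  | case5 => simp only [List.length_cons, List.length_nil] at h; omega

-- A's clause body (bounds already discharged) equals B's per-clause conjunction
lemma pvClauseA_eq (kw col op v : String) (next : Bool)
    (hkw : kw = "where" ∨ kw = "and" ∨ kw = "or") :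
    (if col ∉ ["id", "name", "lastname", "email", "grade"] then false
     else if col ∈ ["name", "lastname", "email"] ∧ op ∉ ["=", "!="] then false
     else if op ∉ ["=", "!=", "<", ">", "<=", ">=", "!<", "!>"] then false
     else if PySem.Str.strIsdigit v then next
     else if PySem.Str.startswith v "'" && PySem.Str.endswith v "'" then
       (if op ∉ ["=", "!="] then false else next)
     else false)
    = (pvClauseB kw col op v && next) := by
  unfold pvClauseB pvCOLS pvSTRICT pvOPS pvEQ
  have hk : decide (kw ∈ ["where", "and", "or"]) = true := by
    rcases hkw with h | h | h <;> simp [h]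
  rw [hk]
  split_ifs <;> simp_all <;> tauto

lemma pvLoopA_eq (n : Nat) : ∀ (ts : List String) (index : Nat), ts.length ≤ index + n →
    pvLoopA ts index = pvRows (ts.drop index) := by
  induction n with
  | zero =>
      intro ts index h
      rw [pvLoopA, if_neg (by omega), List.drop_eq_nil_of_le (by omega)]
      rfl
  | succ n ih =>
      intro ts index h
      by_cases hidx : index < ts.length
      · rw [pvLoopA, if_pos hidx]
        have e0 : ts.drop index = ts.getD index "" :: ts.drop (index + 1) := by
          rw [List.drop_eq_getElem_cons hidx, List.getD_eq_getElem _ _ hidx]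
        by_cases h1 : index + 1 < ts.length
        · have e1 : ts.drop (index + 1) = ts.getD (index + 1) "" :: ts.drop (index + 2) := by
            rw [List.drop_eq_getElem_cons h1, List.getD_eq_getElem _ _ h1]
          by_cases h2 : index + 2 < ts.length
          · have e2 : ts.drop (index + 2) = ts.getD (index + 2) "" :: ts.drop (index + 3) := by
              rw [List.drop_eq_getElem_cons h2, List.getD_eq_getElem _ _ h2]
            by_cases h3 : index + 3 < ts.length
            · have e3 : ts.drop (index + 3) = ts.getD (index + 3) "" :: ts.drop (index + 4) := by
                rw [List.drop_eq_getElem_cons h3, List.getD_eq_getElem _ _ h3]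
              have ihr := ih ts (index + 4) (by omega)
              rw [e0, e1, e2, e3]
              simp only [pvRows, ihr, if_neg (not_not_intro h1), if_neg (not_not_intro h2),
                if_neg (not_not_intro h3)]
              by_cases hw : ts.getD index "" = "where"
              · rw [if_pos hw, pvClauseA_eq _ _ _ _ _ (Or.inl hw)]
              · by_cases hao : ts.getD index "" = "and" ∨ ts.getD index "" = "or"
                · rw [if_neg hw, if_pos hao, pvClauseA_eq _ _ _ _ _ (Or.inr hao)]
                · rw [if_neg hw, if_neg hao]
                  have hk : decide (ts.getD index "" ∈ ["where", "and", "or"]) = false := by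
                    simp only [decide_eq_false_iff_not, List.mem_cons, List.not_mem_nil]; tauto
                  unfold pvClauseB
                  rw [hk]
                  rfl
            · have e3 : ts.drop (index + 3) = [] := List.drop_eq_nil_of_le (by omega)
              rw [e0, e1, e2, e3]
              simp only [pvRows, if_neg (not_not_intro h1), if_neg (not_not_intro h2),
                if_pos h3]
              split_ifs <;> rfl
          · have e2 : ts.drop (index + 2) = [] := List.drop_eq_nil_of_le (by omega)
            rw [e0, e1, e2]
            simp only [pvRows, if_neg (not_not_intro h1), if_pos h2]
            split_ifs <;> rfl
        · have e1 : ts.drop (index + 1) = [] := List.drop_eq_nil_of_le (by omega)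
          rw [e0, e1]
          simp only [pvRows, if_pos h1]
          split_ifs <;> rfl
      · rw [pvLoopA, if_neg hidx, List.drop_eq_nil_of_le (by omega)]
        rfl

-- ===== VERDICT (by name: the statement is the Claim_ definition above) =====
theorem checkdelete_spec : Claim_equal_checkdelete := by
  unfold Claim_equal_checkdelete
  intro query _
  unfold Spec_checkdelete checkdelete checkdelete_alt
  set ts := PySem.Str.split₀ (PySem.Str.lower query) with hts
  clear_value ts
  by_cases hlen : ts.length < 7
  · simp [hlen]
  · obtain ⟨a, b, c, rest, rfl⟩ : ∃ a b c rest, ts = a :: b :: c :: rest := by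
      rcases ts with _ | ⟨a, _ | ⟨b, _ | ⟨c, rest⟩⟩⟩
      · exact absurd (by norm_num) hlen
      · exact absurd (by norm_num) hlen
      · exact absurd (by norm_num) hlen
      · exact ⟨a, b, c, rest, rfl⟩
    have hloop : pvLoopA (a :: b :: c :: rest) 3 = pvRows rest := by
      have h := pvLoopA_eq rest.length (a :: b :: c :: rest) 3
        (by simp only [List.length_cons]; omega)
      simpa using h
    simp only [if_neg hlen, List.take_succ_cons, List.take_zero,
      List.getD_cons_zero, List.getD_cons_succ]
    by_cases ha : a = "delete"
    · by_cases hb : b = "from"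
      · by_cases hc : c = "students"
        · rw [if_neg (show ¬ (a ≠ "delete") from not_not_intro ha),
            if_neg (show ¬ (b ≠ "from") from not_not_intro hb),
            if_neg (show ¬ (c ≠ "students") from not_not_intro hc), hloop]
          by_cases hm : rest.length % 4 = 0
          · have hpre : ¬ ((a :: b :: c :: rest).length < 7 ∨
                [a, b, c] ≠ ["delete", "from", "students"] ∨
                ((a :: b :: c :: rest).length - 3) % 4 ≠ 0) := by
              simp only [List.length_cons, not_or, not_not, ne_eq, not_lt]
              simp only [List.length_cons] at hlen
              refine ⟨?_, ?_, ?_⟩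
              · omega
              · rw [ha, hb, hc]
              · omega
            rw [if_neg hpre, pvRows_eq_staged rest hm]
            rfl
          · have hpre2 : ((a :: b :: c :: rest).length - 3) % 4 ≠ 0 := by
              simp only [List.length_cons]
              omega
            rw [if_pos (Or.inr (Or.inr hpre2))]
            cases hcb : pvRows rest with
            | false => rfl
            | true => exact absurd (pvRows_mod rest hcb) hm
        · rw [if_neg (not_not_intro ha), if_neg (not_not_intro hb), if_pos hc,
            if_pos (Or.inr (Or.inl (by simp [hc])))]
      · rw [if_neg (not_not_intro ha), if_pos hb, if_pos (Or.inr (Or.inl (by simp [hb])))]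
    · rw [if_pos ha, if_pos (Or.inr (Or.inl (by simp [ha])))]
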